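-- pv_equiv track=rewrite | github.com/openvinotoolkit/nncf | nncf/experimental/common/pruning/operations.py | _are_broadcast_dims_in_both_shapes
-- ===== SOURCE A (Python) =====
-- def _are_broadcast_dims_in_both_shapes(shapes) -> bool:
--     """
--     Propagation mask is not supported if both shapes will broadcasting by elementwise operation.
--     True, if both shapes have broadcasted dimensions, otherwise False.
--
--     Example:
--         (1, 10), (10, 1) -> True
--         (1,10), (10,) -> False
--
--     :param shapes: Shapes of tensors.
--     :return: True, if both shapes have broadcasted dimensions, otherwise False.
--     """
--     shape_a = shapes[0]
--     shape_b = shapes[1]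
--     shape_a_size_diff = len(shape_a) - len(shape_b)
--     shape_b_size_diff = -shape_a_size_diff
--     broadcasted_dims_1 = set()
--     broadcasted_dims_2 = set()
--
--     for i in range(len(shape_a)):
--         shifted_elem = i + shape_b_size_diff
--         if shifted_elem >= 0 and shape_a[i] == 1 and shape_b[shifted_elem] != 1:
--             broadcasted_dims_1.add(i)
--         if shifted_elem < 0 and shape_a[i] != 1:
--             broadcasted_dims_2.add(shifted_elem)
--
--     for i in range(len(shape_b)):
--         shifted_elem = i + shape_a_size_diff
--         if shifted_elem >= 0 and shape_b[i] == 1 and shape_a[shifted_elem] != 1: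
--             broadcasted_dims_2.add(i)
--         if shifted_elem < 0 and shape_b[i] != 1:
--             broadcasted_dims_1.add(shifted_elem)
--
--     return bool(broadcasted_dims_1) and bool(broadcasted_dims_2)
-- ===== SOURCE B (Python) =====
-- def _are_broadcast_dims_in_both_shapes(shapes) -> bool:
--     shape_a = shapes[0]
--     shape_b = shapes[1]
--     n = max(len(shape_a), len(shape_b))
--     padded_a = [1] * (n - len(shape_a)) + list(shape_a)
--     padded_b = [1] * (n - len(shape_b)) + list(shape_b)
--     a_bcast = False
--     b_bcast = False
--     for da, db in zip(padded_a, padded_b):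
--         if da == 1 and db != 1:
--             a_bcast = True
--         if db == 1 and da != 1:
--             b_bcast = True
--     return a_bcast and b_bcast
-- ===== Notes on version B (the rewrite author's own statement) =====
-- stated objective: simpler
-- what changed: Replaces the two index-shifted loops maintaining two sets of broadcasted dimension indices by left-padding both shapes with 1s to equal length and making one aligned pass that sets two boolean flags.
import Mathlib
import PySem

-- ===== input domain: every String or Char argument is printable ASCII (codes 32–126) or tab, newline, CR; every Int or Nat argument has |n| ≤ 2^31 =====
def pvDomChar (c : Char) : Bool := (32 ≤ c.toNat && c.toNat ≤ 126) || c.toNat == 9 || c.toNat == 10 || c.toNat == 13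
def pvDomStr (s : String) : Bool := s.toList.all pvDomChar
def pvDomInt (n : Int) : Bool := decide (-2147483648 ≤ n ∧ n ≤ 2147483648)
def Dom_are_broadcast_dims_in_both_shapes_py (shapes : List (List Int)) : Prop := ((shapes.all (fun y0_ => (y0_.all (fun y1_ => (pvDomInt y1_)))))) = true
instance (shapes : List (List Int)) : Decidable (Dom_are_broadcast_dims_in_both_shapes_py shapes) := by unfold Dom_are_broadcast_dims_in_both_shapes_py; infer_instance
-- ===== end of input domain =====

-- B left-pads both shapes with 1s and makes one aligned pass with two boolean flags,
-- instead of A's two index-shifted loops filling two sets; return value equivalence only.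

-- ===== PORT A =====
def are_broadcast_dims_in_both_shapes_py (shapes : List (List Int)) : Bool :=
  let shape_a := (PySem.List.pyGet? shapes 0).getD []
  let shape_b := (PySem.List.pyGet? shapes 1).getD []
  let shape_a_size_diff : Int := (shape_a.length : Int) - (shape_b.length : Int)
  let shape_b_size_diff : Int := -shape_a_size_diff
  -- for i in range(len(shape_a)): …
  let s := (PySem.List.pyRange 0 (shape_a.length : Int) 1).foldl
    (fun (st : PySem.Set Int × PySem.Set Int) i =>
      let shifted_elem := i + shape_b_size_diff
      let st1 := if decide (0 ≤ shifted_elem) && (PySem.List.pyGetD shape_a i 0 == 1)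
                    && !(PySem.List.pyGetD shape_b shifted_elem 0 == 1)
                 then (PySem.Set.add st.1 i, st.2) else st
      if decide (shifted_elem < 0) && !(PySem.List.pyGetD shape_a i 0 == 1)
      then (st1.1, PySem.Set.add st1.2 shifted_elem) else st1)
    (PySem.Set.empty, PySem.Set.empty)
  -- for i in range(len(shape_b)): …
  let s2 := (PySem.List.pyRange 0 (shape_b.length : Int) 1).foldl
    (fun (st : PySem.Set Int × PySem.Set Int) i =>
      let shifted_elem := i + shape_a_size_diff
      let st1 := if decide (0 ≤ shifted_elem) && (PySem.List.pyGetD shape_b i 0 == 1)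
                    && !(PySem.List.pyGetD shape_a shifted_elem 0 == 1)
                 then (st.1, PySem.Set.add st.2 i) else st
      if decide (shifted_elem < 0) && !(PySem.List.pyGetD shape_b i 0 == 1)
      then (PySem.Set.add st1.1 shifted_elem, st1.2) else st1)
    s
  !s2.1.isEmpty && !s2.2.isEmpty

-- ===== PORT B =====
def are_broadcast_dims_in_both_shapes_py_alt (shapes : List (List Int)) : Bool :=
  let shape_a := (PySem.List.pyGet? shapes 0).getD []
  let shape_b := (PySem.List.pyGet? shapes 1).getD []
  let n := max shape_a.length shape_b.length
  let padded_a := List.replicate (n - shape_a.length) (1 : Int) ++ shape_a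
  let padded_b := List.replicate (n - shape_b.length) (1 : Int) ++ shape_b
  let flags := (padded_a.zip padded_b).foldl
    (fun (f : Bool × Bool) p =>
      (if p.1 == 1 && !(p.2 == 1) then true else f.1,
       if p.2 == 1 && !(p.1 == 1) then true else f.2))
    (false, false)
  flags.1 && flags.2

-- ===== PRECONDITION & SPEC =====
-- Pre_ excludes only shapes with fewer than two entries, where A raises IndexError.
def Pre_are_broadcast_dims_in_both_shapes_py (shapes : List (List Int)) : Prop := 2 ≤ shapes.length
instance (shapes : List (List Int)) : Decidable (Pre_are_broadcast_dims_in_both_shapes_py shapes) := by unfold Pre_are_broadcast_dims_in_both_shapes_py; infer_instance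
def pvWitness_are_broadcast_dims_in_both_shapes_py : List (List Int) := [[1, 10], [10, 1]]

def Spec_are_broadcast_dims_in_both_shapes_py (shapes : List (List Int)) (out : Bool) : Prop := out = are_broadcast_dims_in_both_shapes_py_alt shapes
instance (shapes : List (List Int)) (out : Bool) : Decidable (Spec_are_broadcast_dims_in_both_shapes_py shapes out) := by unfold Spec_are_broadcast_dims_in_both_shapes_py; infer_instance

-- ===== CLAIM (what is proved, stated in full; the proofs are below) =====
def Claim_equal_are_broadcast_dims_in_both_shapes_py : Prop := ∀ (shapes : List (List Int)), Dom_are_broadcast_dims_in_both_shapes_py shapes → Pre_are_broadcast_dims_in_both_shapes_py shapes → Spec_are_broadcast_dims_in_both_shapes_py shapes (are_broadcast_dims_in_both_shapes_py shapes)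

-- ===== LEMMAS AND PROOFS =====

theorem add_not_isEmpty (s : PySem.Set Int) (x : Int) : (PySem.Set.add s x).isEmpty = false := by
  unfold PySem.Set.add
  split_ifs with h
  · cases s with
    | nil => simp [PySem.Set.contains] at h
    | cons a t => rfl
  · simp

theorem loopA1_split (c1 c2 : Int → Bool) (e2 : Int → Int) (l : List Int) (s : PySem.Set Int × PySem.Set Int) :
    l.foldl (fun (st : PySem.Set Int × PySem.Set Int) i =>
      let st1 := if c1 i then (PySem.Set.add st.1 i, st.2) else st
      if c2 i then (st1.1, PySem.Set.add st1.2 (e2 i)) else st1) s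
    = (l.foldl (fun t i => if c1 i then PySem.Set.add t i else t) s.1,
       l.foldl (fun t i => if c2 i then PySem.Set.add t (e2 i) else t) s.2) := by
  induction l generalizing s with
  | nil => simp
  | cons x xs ih =>
    simp only [List.foldl_cons]
    rw [ih]
    congr 1 <;> (split_ifs <;> rfl)

theorem loopA2_split (c1 c2 : Int → Bool) (e2 : Int → Int) (l : List Int) (s : PySem.Set Int × PySem.Set Int) :
    l.foldl (fun (st : PySem.Set Int × PySem.Set Int) i =>
      let st1 := if c1 i then (st.1, PySem.Set.add st.2 i) else st
      if c2 i then (PySem.Set.add st1.1 (e2 i), st1.2) else st1) s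
    = (l.foldl (fun t i => if c2 i then PySem.Set.add t (e2 i) else t) s.1,
       l.foldl (fun t i => if c1 i then PySem.Set.add t i else t) s.2) := by
  induction l generalizing s with
  | nil => simp
  | cons x xs ih =>
    simp only [List.foldl_cons]
    rw [ih]
    congr 1 <;> (split_ifs <;> rfl)

theorem fold_add_isEmpty (c : Int → Bool) (e : Int → Int) (l : List Int) (s : PySem.Set Int) :
    (l.foldl (fun t i => if c i then PySem.Set.add t (e i) else t) s).isEmpty
    = (s.isEmpty && !(l.any c)) := by
  induction l generalizing s with
  | nil => simp
  | cons x xs ih =>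
    simp only [List.foldl_cons, List.any_cons]
    by_cases h : c x
    · rw [ih]; simp [h, add_not_isEmpty]
    · rw [ih]; simp [h]

theorem loopB_split (l : List (Int × Int)) (f : Bool × Bool) :
    l.foldl (fun (f : Bool × Bool) p =>
      (if p.1 == 1 && !(p.2 == 1) then true else f.1,
       if p.2 == 1 && !(p.1 == 1) then true else f.2)) f
    = (f.1 || l.any (fun p => p.1 == 1 && !(p.2 == 1)),
       f.2 || l.any (fun p => p.2 == 1 && !(p.1 == 1))) := by
  induction l generalizing f with
  | nil => simp
  | cons x xs ih =>
    simp only [List.foldl_cons, List.any_cons]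
    rw [ih]
    obtain ⟨x1, x2⟩ := x
    by_cases hx : x1 = 1 <;> by_cases hy : x2 = 1 <;>
      (first
        | (have hx' : (x1 == 1) = true := by simpa using hx
           have hy' : (x2 == 1) = true := by simpa using hy
           simp [hx', hy'])
        | (have hx' : (x1 == 1) = true := by simpa using hx
           have hy' : (x2 == 1) = false := by simpa using hy
           simp [hx', hy'])
        | (have hx' : (x1 == 1) = false := by simpa using hx
           have hy' : (x2 == 1) = true := by simpa using hy
           simp [hx', hy'])
        | (have hx' : (x1 == 1) = false := by simpa using hx
           have hy' : (x2 == 1) = false := by simpa using hy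
           simp [hx', hy']))

theorem pad_getElem (k : Nat) (a : List Int) (j : Nat) (h : j < k + a.length) :
    (List.replicate k (1 : Int) ++ a)[j]'(by simp; omega) = if hj : j < k then 1 else a.getD (j - k) 0 := by
  split_ifs with hj
  · rw [List.getElem_append_left (by simpa using hj)]
    exact List.getElem_replicate _
  · rw [List.getElem_append_right (by simp only [List.length_replicate]; omega)]
    rw [List.getD_eq_getElem _ _ (by omega)]
    simp

theorem align_key (a b : List Int) :
    ((List.replicate (max a.length b.length - a.length) (1 : Int) ++ a).zip
     (List.replicate (max a.length b.length - b.length) (1 : Int) ++ b)).any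
       (fun p => p.1 == 1 && !(p.2 == 1))
    = ((PySem.List.pyRange 0 (a.length : Int) 1).any (fun i =>
          decide (0 ≤ i + (-((a.length : Int) - (b.length : Int)))) && (PySem.List.pyGetD a i 0 == 1)
            && !(PySem.List.pyGetD b (i + (-((a.length : Int) - (b.length : Int)))) 0 == 1))
       || (PySem.List.pyRange 0 (b.length : Int) 1).any (fun i =>
          decide (i + ((a.length : Int) - (b.length : Int)) < 0) && !(PySem.List.pyGetD b i 0 == 1))) := by
  rw [Bool.eq_iff_iff]
  simp only [List.any_eq_true, Bool.or_eq_true, Bool.and_eq_true, beq_iff_eq,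
    Bool.not_eq_true', beq_eq_false_iff_ne, ne_eq, decide_eq_true_eq,
    PySem.List.mem_pyRange_one, and_assoc]
  constructor
  · rintro ⟨p, hmem, hp1, hp2⟩
    obtain ⟨j, hj, rfl⟩ := List.mem_iff_getElem.1 hmem
    have hjn : j < max a.length b.length := by
      simp [List.length_zip] at hj; omega
    rw [List.getElem_zip] at hp1 hp2
    simp only at hp1 hp2
    rw [pad_getElem _ _ _ (by omega)] at hp1
    rw [pad_getElem _ _ _ (by omega)] at hp2
    by_cases hB : j < max a.length b.length - b.length
    · rw [dif_pos hB] at hp2; exact absurd rfl hp2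
    rw [dif_neg hB] at hp2
    by_cases hA : j < max a.length b.length - a.length
    · rw [dif_pos hA] at hp1
      refine Or.inr ⟨(j : Int) - ((max a.length b.length : Int) - (b.length : Int)),
        by omega, by omega, by omega, ?_⟩
      rw [PySem.List.pyGetD_of_nonneg _ _ (by omega)]
      have he : ((j : Int) - ((max a.length b.length : Int) - (b.length : Int))).toNat
          = j - (max a.length b.length - b.length) := by omega
      rw [he]; exact hp2
    · rw [dif_neg hA] at hp1
      refine Or.inl ⟨(j : Int) - ((max a.length b.length : Int) - (a.length : Int)),
        by omega, by omega, by omega, ?_, ?_⟩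
      · rw [PySem.List.pyGetD_of_nonneg _ _ (by omega)]
        have he : (((j : Int) - ((max a.length b.length : Int) - (a.length : Int)))).toNat
            = j - (max a.length b.length - a.length) := by omega
        rw [he]; exact hp1
      · rw [PySem.List.pyGetD_of_nonneg _ _ (by omega)]
        have he : (((j : Int) - ((max a.length b.length : Int) - (a.length : Int))) + (-((a.length : Int) - (b.length : Int)))).toNat
            = j - (max a.length b.length - b.length) := by omega
        rw [he]; exact hp2
  · rintro (⟨i, hi0, hila, hsh, h1, h2⟩ | ⟨i, hi0, hilb, hsh, h2⟩)
    · refine ⟨_, List.mem_iff_getElem.2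
        ⟨i.toNat + (max a.length b.length - a.length), by simp; omega, rfl⟩, ?_, ?_⟩
      all_goals rw [List.getElem_zip]
      all_goals simp only
      · rw [pad_getElem _ _ _ (by omega), dif_neg (by omega)]
        have he : i.toNat + (max a.length b.length - a.length) - (max a.length b.length - a.length) = i.toNat := by omega
        rw [he]
        rw [PySem.List.pyGetD_of_nonneg _ _ hi0] at h1
        exact h1
      · rw [pad_getElem _ _ _ (by omega), dif_neg (by omega)]
        rw [PySem.List.pyGetD_of_nonneg _ _ (by omega)] at h2
        have he : i.toNat + (max a.length b.length - a.length) - (max a.length b.length - b.length)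
            = (i + (-((a.length : Int) - (b.length : Int)))).toNat := by omega
        rw [he]; exact h2
    · refine ⟨_, List.mem_iff_getElem.2
        ⟨i.toNat + (max a.length b.length - b.length), by simp; omega, rfl⟩, ?_, ?_⟩
      all_goals rw [List.getElem_zip]
      all_goals simp only
      · rw [pad_getElem _ _ _ (by omega), dif_pos (by omega)]
      · rw [pad_getElem _ _ _ (by omega), dif_neg (by omega)]
        rw [PySem.List.pyGetD_of_nonneg _ _ hi0] at h2
        have he : i.toNat + (max a.length b.length - b.length) - (max a.length b.length - b.length) = i.toNat := by omega
        rw [he]; exact h2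

theorem zip_any_flip (l l' : List Int) :
    (l.zip l').any (fun p => p.2 == 1 && !(p.1 == 1))
    = (l'.zip l).any (fun p => p.1 == 1 && !(p.2 == 1)) := by
  rw [← List.zip_swap l' l, List.any_map]
  rfl

-- ===== VERDICT (by name: the statement is the Claim_ definition above) =====
theorem are_broadcast_dims_in_both_shapes_py_spec : Claim_equal_are_broadcast_dims_in_both_shapes_py := by
  intro shapes _ _
  unfold Spec_are_broadcast_dims_in_both_shapes_py
  simp only [are_broadcast_dims_in_both_shapes_py, are_broadcast_dims_in_both_shapes_py_alt]
  generalize (PySem.List.pyGet? shapes 0).getD [] = a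
  generalize (PySem.List.pyGet? shapes 1).getD [] = b
  rw [loopA1_split, loopA2_split, loopB_split]
  simp only [fold_add_isEmpty]
  rw [zip_any_flip, align_key a b, Nat.max_comm a.length b.length, align_key b a]
  simp only [neg_sub, PySem.Set.empty, List.isEmpty_nil, Bool.true_and, Bool.false_or,
    Bool.not_and, Bool.not_not]
  generalize ((PySem.List.pyRange 0 (a.length : Int) 1).any _) = x1
  generalize ((PySem.List.pyRange 0 (b.length : Int) 1).any _) = x2
  generalize ((PySem.List.pyRange 0 (a.length : Int) 1).any _) = x3
  generalize ((PySem.List.pyRange 0 (b.length : Int) 1).any _) = x4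
  cases x1 <;> cases x2 <;> cases x3 <;> cases x4 <;> rfl
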